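-- pv_equiv track=rewrite | github.com/Tenebrar/codebase | hacker/challenges/crypto/unsolved/not_smaller_yet.py | get_forward_distances
-- ===== SOURCE A (Python) =====
-- value = '(34)e.rugressgsdtedsme  . -prr wierohrhdmhelht ssnnatTWgTtks hoe rriiaacolfwffyrseoTtoaooruiiawnnu x  t eoB   oe '  # noqa
--
-- def get_forward_distances(char1, char2):
--     results = []
--     for i1, c1 in enumerate(value):
--         if c1 == char1:
--             for i2, c2 in enumerate(value):
--                 if c2 == char2:
--                     results.append( (i2 - i1) % (len(value)) )
--     return sorted(set(results))
-- ===== SOURCE B (Python) =====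
-- value = '(34)e.rugressgsdtedsme  . -prr wierohrhdmhelht ssnnatTWgTtks hoe rriiaacolfwffyrseoTtoaooruiiawnnu x  t eoB   oe '  # noqa
--
-- def get_forward_distances(char1, char2):
--     n = len(value)
--     positions1 = [i for i, c in enumerate(value) if c == char1]
--     positions2 = [i for i, c in enumerate(value) if c == char2]
--     return sorted({(i2 - i1) % n for i1 in positions1 for i2 in positions2})
-- ===== Notes on version B (the rewrite author's own statement) =====
-- stated objective: simpler
-- what changed: B scans the module string once to precompute the index lists of each character and then combines the two index lists directly, instead of re-scanning the whole string inside the outer loop for every occurrence of char1.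
import Mathlib
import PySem

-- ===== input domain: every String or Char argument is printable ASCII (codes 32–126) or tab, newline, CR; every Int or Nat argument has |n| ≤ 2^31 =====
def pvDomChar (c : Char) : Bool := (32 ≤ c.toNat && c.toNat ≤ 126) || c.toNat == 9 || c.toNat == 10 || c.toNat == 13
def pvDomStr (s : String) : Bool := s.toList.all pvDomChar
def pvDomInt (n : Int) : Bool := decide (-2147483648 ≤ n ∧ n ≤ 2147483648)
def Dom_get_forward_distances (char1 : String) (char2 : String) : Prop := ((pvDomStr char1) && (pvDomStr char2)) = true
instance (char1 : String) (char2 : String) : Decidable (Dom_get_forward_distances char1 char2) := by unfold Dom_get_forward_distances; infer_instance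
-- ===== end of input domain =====

-- B precomputes the two index lists in one pass each and combines them, instead of
-- re-scanning the whole module string inside the outer loop; objective: simpler.

def pvValue : String := "(34)e.rugressgsdtedsme  . -prr wierohrhdmhelht ssnnatTWgTtks hoe rriiaacolfwffyrseoTtoaooruiiawnnu x  t eoB   oe "

-- ===== PORT A =====
def get_forward_distances (char1 : String) (char2 : String) : List Int :=
  let results : List Int :=
    (PySem.List.enumerate pvValue.toList).foldl (fun results p =>
      if [p.2] = char1.toList then
        (PySem.List.enumerate pvValue.toList).foldl (fun results q =>
          if [q.2] = char2.toList then
            results ++ [PySem.Int.mod (q.1 - p.1) (PySem.Str.len pvValue)]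
          else results) results
      else results) []
  PySem.List.sorted (PySem.Set.ofList results) (fun x => x) false

-- ===== PORT B =====
def get_forward_distances_alt (char1 : String) (char2 : String) : List Int :=
  let n : Int := PySem.Str.len pvValue
  let positions1 : List Int := (PySem.List.enumerate pvValue.toList).filterMap
    (fun p => if [p.2] = char1.toList then some p.1 else none)
  let positions2 : List Int := (PySem.List.enumerate pvValue.toList).filterMap
    (fun q => if [q.2] = char2.toList then some q.1 else none)
  PySem.List.sorted
    (PySem.Set.ofList (positions1.flatMap (fun i1 =>
      positions2.map (fun i2 => PySem.Int.mod (i2 - i1) n))))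
    (fun x => x) false

-- ===== PRECONDITION & SPEC =====
def Spec_get_forward_distances (char1 : String) (char2 : String) (out : List Int) : Prop := out = get_forward_distances_alt char1 char2
instance (char1 : String) (char2 : String) (out : List Int) : Decidable (Spec_get_forward_distances char1 char2 out) := by unfold Spec_get_forward_distances; infer_instance

-- ===== CLAIM (what is proved, stated in full; the proofs are below) =====
def Claim_equal_get_forward_distances : Prop := ∀ (char1 : String) (char2 : String), Dom_get_forward_distances char1 char2 → Spec_get_forward_distances char1 char2 (get_forward_distances char1 char2)

-- ===== LEMMAS AND PROOFS =====

-- inner loop of A: conditional append over a list = map over the filtered sublist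
theorem pv_foldl_if_append {α γ : Type} (p : α → Prop) [DecidablePred p] (g : α → γ) :
    ∀ (l : List α) (acc : List γ),
      l.foldl (fun r q => if p q then r ++ [g q] else r) acc
        = acc ++ l.filterMap (fun q => if p q then some (g q) else none) := by
  intro l
  induction l with
  | nil => intro acc; simp
  | cons x xs ih =>
    intro acc
    by_cases hx : p x <;> simp [hx, ih]

-- outer loop of A, after the inner loop is rewritten to an append
theorem pv_foldl_if_append_block {α γ : Type} (p : α → Prop) [DecidablePred p] (h : α → List γ) :
    ∀ (l : List α) (acc : List γ),
      l.foldl (fun r q => if p q then r ++ h q else r) acc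
        = acc ++ (l.filterMap (fun q => if p q then some q else none)).flatMap h := by
  intro l
  induction l with
  | nil => intro acc; simp
  | cons x xs ih =>
    intro acc
    by_cases hx : p x <;> simp [hx, ih]

-- projecting the index commutes with filterMap
theorem pv_filterMap_fst (p : Int × Char → Prop) [DecidablePred p] :
    ∀ (l : List (Int × Char)),
      l.filterMap (fun q => if p q then some q.1 else none)
        = (l.filterMap (fun q => if p q then some q else none)).map (·.1) := by
  intro l
  induction l with
  | nil => simp
  | cons x xs ih =>
    by_cases hx : p x <;> simp [hx, ih]

-- the inner map of A, pulled out of the filter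
theorem pv_filterMap_mod (p : Int × Char → Prop) [DecidablePred p] (i n : Int) :
    ∀ (l : List (Int × Char)),
      l.filterMap (fun q => if p q then some (PySem.Int.mod (q.1 - i) n) else none)
        = (l.filterMap (fun q => if p q then some q else none)).map
            (fun q => PySem.Int.mod (q.1 - i) n) := by
  intro l
  induction l with
  | nil => simp
  | cons x xs ih =>
    by_cases hx : p x <;> simp [hx, ih]

theorem get_forward_distances_lists_eq (char1 char2 : String) :
    get_forward_distances char1 char2 = get_forward_distances_alt char1 char2 := by
  unfold get_forward_distances get_forward_distances_alt
  simp only [pv_foldl_if_append, pv_foldl_if_append_block, pv_filterMap_fst,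
    pv_filterMap_mod, List.flatMap_map, List.map_map, List.nil_append, Function.comp_def]

-- ===== VERDICT (by name: the statement is the Claim_ definition above) =====
theorem get_forward_distances_spec : Claim_equal_get_forward_distances := by
  intro char1 char2 _
  exact get_forward_distances_lists_eq char1 char2
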